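-- pv_equiv track=rewrite | github.com/evh0106/IronSyncroWealth | koreainvestment/src/trading/trading.py | _select_columns
-- ===== SOURCE A (Python) =====
-- from typing import Any
--
-- def _select_columns(rows: list[dict[str, Any]]) -> list[str]:
--     if not rows:
--         return []
--
--     preferred = [
--         "odno",
--         "ord_tmd",
--         "pdno",
--         "prdt_name",
--         "ord_qty",
--         "ord_unpr",
--         "tot_ccld_qty",
--         "tot_ccld_amt",
--     ]
--
--     keys = list(rows[0].keys())
--     columns = [k for k in preferred if k in keys]
--     for key in keys:
--         if key not in columns:
--             columns.append(key)
--     return columns[:8]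
-- ===== SOURCE B (Python) =====
-- from typing import Any
--
-- def _select_columns(rows: list[dict[str, Any]]) -> list[str]:
--     if not rows:
--         return []
--
--     preferred = [
--         "odno",
--         "ord_tmd",
--         "pdno",
--         "prdt_name",
--         "ord_qty",
--         "ord_unpr",
--         "tot_ccld_qty",
--         "tot_ccld_amt",
--     ]
--
--     slots: list = [None] * len(preferred)
--     rest: list[str] = []
--     for key in rows[0].keys():
--         if key in preferred:
--             slots[preferred.index(key)] = key
--         else:
--             rest.append(key)
--     return ([s for s in slots if s is not None] + rest)[:8]
-- ===== Notes on version B (the rewrite author's own statement) =====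
-- stated objective: alternative
-- what changed: A filters the preferred list against the keys and then runs an append-if-absent loop with a linear membership scan over the growing result; B makes one bucket-placement pass over the keys, dropping each preferred key into its fixed slot and the others into a tail list, then concatenates the occupied slots with the tail.
import Mathlib
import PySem

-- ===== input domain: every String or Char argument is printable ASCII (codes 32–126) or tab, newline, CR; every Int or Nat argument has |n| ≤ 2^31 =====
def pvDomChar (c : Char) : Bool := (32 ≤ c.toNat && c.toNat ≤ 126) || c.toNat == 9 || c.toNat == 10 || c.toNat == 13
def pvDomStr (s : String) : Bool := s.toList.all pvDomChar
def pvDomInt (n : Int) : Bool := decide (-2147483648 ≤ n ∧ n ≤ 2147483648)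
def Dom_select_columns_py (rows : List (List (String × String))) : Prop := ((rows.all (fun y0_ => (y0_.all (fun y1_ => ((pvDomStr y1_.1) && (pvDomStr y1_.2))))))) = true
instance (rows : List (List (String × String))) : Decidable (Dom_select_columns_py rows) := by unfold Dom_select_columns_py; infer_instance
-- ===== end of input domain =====

-- B replaces A's filter-then-append-if-absent passes by one bucket-placement pass over the keys
-- (preferred keys into fixed slots, others into a tail list); alternative decomposition, same value.

-- ===== PORT A =====
-- literal port of A: empty guard, preferred literal, keys of rows[0], comprehension filter,
-- append-if-absent loop, columns[:8] (nonnegative stop on a list: take 8, cf. PySem.List.slice_to)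
def select_columns_py (rows : List (List (String × String))) : List String :=
  match rows with
  | [] => []
  | r :: _ =>
      let preferred : List String :=
        ["odno", "ord_tmd", "pdno", "prdt_name", "ord_qty", "ord_unpr", "tot_ccld_qty", "tot_ccld_amt"]
      let keys := (PySem.Dict.mk r).keys
      let columns := preferred.filter (fun k => decide (k ∈ keys))
      let columns := keys.foldl (fun cols key => if key ∈ cols then cols else cols ++ [key]) columns
      columns.take 8

-- ===== PORT B =====
-- literal port of B: empty guard, preferred literal, slots = [None]*len(preferred), rest = [],
-- one pass over rows[0].keys() placing each preferred key at preferred.index(key) and appending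
-- the others to rest, then ([s for s in slots if s is not None] + rest)[:8].
-- (the 'none' branch of the match is unreachable: preferred.index is guarded by key ∈ preferred)
def select_columns_py_alt (rows : List (List (String × String))) : List String :=
  match rows with
  | [] => []
  | r :: _ =>
      let preferred : List String :=
        ["odno", "ord_tmd", "pdno", "prdt_name", "ord_qty", "ord_unpr", "tot_ccld_qty", "tot_ccld_amt"]
      let st := ((PySem.Dict.mk r).keys).foldl
        (fun st key =>
          if key ∈ preferred then
            match PySem.List.index? preferred key with
            | some i => (st.1.set i (some key), st.2)
            | none => st
          else (st.1, st.2 ++ [key]))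
        (List.replicate preferred.length (none : Option String), ([] : List String))
      (st.1.filterMap id ++ st.2).take 8

-- ===== PRECONDITION & SPEC =====
-- Pre_ excludes inputs whose first row carries a duplicated key: a Python dict cannot hold
-- duplicate keys, so such an association list represents no input the Python function receives.
def Pre_select_columns_py (rows : List (List (String × String))) : Prop :=
  ∀ r ∈ rows.take 1, (r.map Prod.fst).Nodup
instance (rows : List (List (String × String))) : Decidable (Pre_select_columns_py rows) := by
  unfold Pre_select_columns_py; infer_instance

def pvWitness_select_columns_py : (List (List (String × String))) :=
  [[("pdno", "005930"), ("foo", "1"), ("odno", "77")]]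

def Spec_select_columns_py (rows : List (List (String × String))) (out : List String) : Prop := out = select_columns_py_alt rows
instance (rows : List (List (String × String))) (out : List String) : Decidable (Spec_select_columns_py rows out) := by unfold Spec_select_columns_py; infer_instance

-- ===== CLAIM (what is proved, stated in full; the proofs are below) =====
def Claim_equal_select_columns_py : Prop := ∀ (rows : List (List (String × String))), Dom_select_columns_py rows → Pre_select_columns_py rows → Spec_select_columns_py rows (select_columns_py rows)

-- ===== LEMMAS AND PROOFS =====

-- the preferred list, named for the proofs
def pvPref : List String :=
  ["odno", "ord_tmd", "pdno", "prdt_name", "ord_qty", "ord_unpr", "tot_ccld_qty", "tot_ccld_amt"]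

-- the slot array B has built after having seen the keys 'ks'
def pvSlots (ks : List String) : List (Option String) :=
  pvPref.map (fun k => if k ∈ ks then some k else none)

-- B's step function, named for the proofs (the port's inline lambda, with preferred = pvPref)
def pvStep (st : List (Option String) × List String) (key : String) :
    List (Option String) × List String :=
  if key ∈ pvPref then
    match PySem.List.index? pvPref key with
    | some i => (st.1.set i (some key), st.2)
    | none => st
  else (st.1, st.2 ++ [key])

lemma pvSlots_nil : pvSlots [] = List.replicate pvPref.length (none : Option String) := by decide

-- seeing a non-preferred key leaves the slots unchanged
lemma pvSlots_append_notmem (seen : List String) (k : String) (hk : k ∉ pvPref) :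
    pvSlots (seen ++ [k]) = pvSlots seen := by
  unfold pvSlots
  apply List.map_congr_left
  intro p hp
  have : p ≠ k := fun h => hk (h ▸ hp)
  simp [List.mem_append, this]

-- seeing a preferred key fills exactly its slot
lemma pvSlots_append_mem (seen : List String) (k : String) (hk : k ∈ pvPref) :
    ∃ i, PySem.List.index? pvPref k = some i ∧
      (pvSlots seen).set i (some k) = pvSlots (seen ++ [k]) := by
  simp only [pvPref, List.mem_cons, List.not_mem_nil, or_false] at hk
  rcases hk with rfl|rfl|rfl|rfl|rfl|rfl|rfl|rfl
  · exact ⟨0, by decide, by simp [pvSlots, pvPref, List.mem_append]⟩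
  · exact ⟨1, by decide, by simp [pvSlots, pvPref, List.mem_append]⟩
  · exact ⟨2, by decide, by simp [pvSlots, pvPref, List.mem_append]⟩
  · exact ⟨3, by decide, by simp [pvSlots, pvPref, List.mem_append]⟩
  · exact ⟨4, by decide, by simp [pvSlots, pvPref, List.mem_append]⟩
  · exact ⟨5, by decide, by simp [pvSlots, pvPref, List.mem_append]⟩
  · exact ⟨6, by decide, by simp [pvSlots, pvPref, List.mem_append]⟩
  · exact ⟨7, by decide, by simp [pvSlots, pvPref, List.mem_append]⟩

-- B's loop invariant: slots record which preferred keys were seen, rest collects the others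
lemma b_loop : ∀ (ks seen rest : List String),
    ks.foldl pvStep (pvSlots seen, rest)
      = (pvSlots (seen ++ ks), rest ++ ks.filter (fun k => decide (k ∉ pvPref))) := by
  intro ks
  induction ks with
  | nil => intro seen rest; simp
  | cons k ks ih =>
      intro seen rest
      by_cases hk : k ∈ pvPref
      · obtain ⟨i, hi, hset⟩ := pvSlots_append_mem seen k hk
        have hstep : pvStep (pvSlots seen, rest) k = (pvSlots (seen ++ [k]), rest) := by
          unfold pvStep
          rw [if_pos hk, hi]
          show ((pvSlots seen).set i (some k), rest) = (pvSlots (seen ++ [k]), rest)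
          rw [hset]
        rw [List.foldl_cons, hstep, ih (seen ++ [k]) rest]
        simp [hk, List.append_assoc]
      · have hstep : pvStep (pvSlots seen, rest) k = (pvSlots seen, rest ++ [k]) := by
          unfold pvStep
          rw [if_neg hk]
        rw [List.foldl_cons, hstep, ← pvSlots_append_notmem seen k hk,
            ih (seen ++ [k]) (rest ++ [k])]
        simp [hk, List.append_assoc]

-- reading the occupied slots gives the preferred keys that occur, in preferred order
lemma filterMap_guard (ks : List String) : ∀ l : List String,
    l.filterMap (fun k => if k ∈ ks then some k else none)
      = l.filter (fun k => decide (k ∈ ks)) := by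
  intro l
  induction l with
  | nil => rfl
  | cons p l ih =>
      by_cases hp : p ∈ ks <;> simp [hp, ih]

lemma filterMap_pvSlots (ks : List String) :
    (pvSlots ks).filterMap id = pvPref.filter (fun k => decide (k ∈ ks)) := by
  rw [pvSlots, List.filterMap_map]
  simpa [Function.comp] using filterMap_guard ks pvPref

-- A's append loop: on nodup keys whose acc-membership agrees with preferred-membership it
-- appends exactly the non-preferred keys, in order
lemma a_loop (r : List String) : ∀ acc : List String, r.Nodup →
    (∀ k ∈ r, (k ∈ acc ↔ k ∈ pvPref)) →
    r.foldl (fun cols key => if key ∈ cols then cols else cols ++ [key]) acc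
      = acc ++ r.filter (fun k => decide (k ∉ pvPref)) := by
  induction r with
  | nil => intro acc _ _; simp
  | cons k r ih =>
      intro acc hnd hmem
      have hkr : k ∉ r := (List.nodup_cons.mp hnd).1
      have hnd' : r.Nodup := (List.nodup_cons.mp hnd).2
      by_cases hk : k ∈ acc
      · have hkp : k ∈ pvPref := (hmem k (by simp)).mp hk
        simp only [List.foldl_cons, if_pos hk, List.filter_cons, decide_eq_true_eq]
        rw [if_neg (by simp [hkp])]
        exact ih acc hnd' (fun k' hk' => hmem k' (by simp [hk']))
      · have hkp : k ∉ pvPref := fun h => hk ((hmem k (by simp)).mpr h)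
        simp only [List.foldl_cons, if_neg hk, List.filter_cons, decide_eq_true_eq]
        rw [if_pos (by simp [hkp])]
        rw [ih (acc ++ [k]) hnd' (fun k' hk' => by
          have : k' ≠ k := fun h => hkr (h ▸ hk')
          simp [List.mem_append, this, hmem k' (by simp [hk'])])]
        simp

theorem select_columns_py_aux (rows : List (List (String × String)))
    (hpre : Pre_select_columns_py rows) :
    select_columns_py rows = select_columns_py_alt rows := by
  cases rows with
  | nil => rfl
  | cons r t =>
      have hnd : ((PySem.Dict.mk r).keys).Nodup := by
        simpa [PySem.Dict.keys] using hpre r (by simp)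
      show (((PySem.Dict.mk r).keys).foldl (fun cols key => if key ∈ cols then cols else cols ++ [key])
              (pvPref.filter (fun k => decide (k ∈ (PySem.Dict.mk r).keys)))).take 8
          = ((((PySem.Dict.mk r).keys).foldl pvStep
              (List.replicate pvPref.length (none : Option String), [])).1.filterMap id
             ++ (((PySem.Dict.mk r).keys).foldl pvStep
              (List.replicate pvPref.length (none : Option String), [])).2).take 8
      rw [← pvSlots_nil, b_loop _ [] []]
      rw [a_loop _ _ hnd (fun k hk =>
            ⟨fun h => (List.mem_filter.mp h).1,
             fun h => List.mem_filter.mpr ⟨h, by simpa using hk⟩⟩)]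
      simp only [List.nil_append]
      rw [filterMap_pvSlots]

-- ===== VERDICT (by name: the statement is the Claim_ definition above) =====
theorem select_columns_py_spec : Claim_equal_select_columns_py := by
  intro rows _ hpre
  exact select_columns_py_aux rows hpre
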